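-- pv_equiv track=rewrite | github.com/MoAlshatti/cryptology_coursework | cbc_attack/cbc_attack.py | setProperPadding
-- ===== SOURCE A (Python) =====
-- def setCipherTextFromPlainText(ogCipherText, ogPlainText, wantedPlainText):
--     ogCipherText = int(ogCipherText, 16)
--     ogPlainText = int(ogPlainText, 16)
--     wantedPlainText = int(wantedPlainText, 16)
--     cipherVal = ogCipherText ^ ogPlainText ^ wantedPlainText
--     return format(cipherVal, "02x")
--
-- def setProperPadding(paddingVal, nonce, plainTexts):
--     paddingStrVal = format(paddingVal, "02x")
--     n = [nonce[i : i + 2] for i in range(0, len(nonce), 2)]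
--     for i in range(paddingVal - 1):
--         n[-(i + 1)] = setCipherTextFromPlainText(
--             n[-(i + 1)], plainTexts[i], paddingStrVal
--         )
--     return "".join(n)
-- ===== SOURCE B (Python) =====
-- def setCipherTextFromPlainText(ogCipherText, ogPlainText, wantedPlainText):
--     ogCipherText = int(ogCipherText, 16)
--     ogPlainText = int(ogPlainText, 16)
--     wantedPlainText = int(wantedPlainText, 16)
--     cipherVal = ogCipherText ^ ogPlainText ^ wantedPlainText
--     return format(cipherVal, "02x")
--
--
-- def setProperPadding(paddingVal, nonce, plainTexts):
--     k = paddingVal - 1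
--     if k <= 0:
--         return nonce
--     padHex = format(paddingVal, "02x")
--     cut = 2 * ((len(nonce) + 1) // 2 - k)
--     pieces = [nonce[:cut]]
--     for p in reversed(plainTexts[:k]):
--         pieces.append(setCipherTextFromPlainText(nonce[cut:cut + 2], p, padHex))
--         cut += 2
--     return "".join(pieces)
-- ===== Notes on version B (the rewrite author's own statement) =====
-- stated objective: alternative
-- what changed: B replaces A's build-chunk-list-then-mutate-via-negative-indices-then-join structure by an early return for paddingVal<=1, an untouched prefix slice of the nonce, and one forward pass zipping the suffix chunks against the reversed plaintext prefix, appending transformed pieces.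
import Mathlib
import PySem

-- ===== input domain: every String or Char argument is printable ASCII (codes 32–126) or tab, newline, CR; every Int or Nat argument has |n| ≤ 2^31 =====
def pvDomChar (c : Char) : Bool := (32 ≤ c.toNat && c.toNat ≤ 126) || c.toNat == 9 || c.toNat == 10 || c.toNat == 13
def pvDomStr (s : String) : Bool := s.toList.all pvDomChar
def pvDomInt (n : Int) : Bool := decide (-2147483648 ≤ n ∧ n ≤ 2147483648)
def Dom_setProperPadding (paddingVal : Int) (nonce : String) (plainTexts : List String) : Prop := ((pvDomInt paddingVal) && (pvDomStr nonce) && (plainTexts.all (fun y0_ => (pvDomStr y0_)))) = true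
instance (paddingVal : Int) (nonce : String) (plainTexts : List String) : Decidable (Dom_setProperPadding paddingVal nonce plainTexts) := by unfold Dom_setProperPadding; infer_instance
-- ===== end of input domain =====

-- B rewrites the body of setProperPadding with a different decomposition (untouched prefix slice + forward
-- zip over the reversed plaintext prefix, no chunk-list mutation, no negative indexing); the shared module
-- helper setCipherTextFromPlainText is kept as in the source module. Objective: alternative (same cost).

-- ===== PORT A =====
-- format(n, "02x"): no PySem primitive — hex digits via Nat.toDigits 16 (lowercase, MSB first, 0 → "0",
-- sign in front for negatives), then zero-fill to width 2 with PySem.Chars.zfill; exact for every Int.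
def hexStr (n : Int) : List Char :=
  if n < 0 then '-' :: Nat.toDigits 16 (-n).toNat else Nat.toDigits 16 n.toNat

def format02x (n : Int) : List Char := PySem.Chars.zfill (hexStr n) 2

-- port of the module helper setCipherTextFromPlainText (on char lists); int(s, 16) is
-- PySem.Int.ofCharsBase? with .getD 0 — total form, exact under Pre_ (parse succeeds there)
def setCipherTextFromPlainTextC (ogCipherText ogPlainText wantedPlainText : List Char) : List Char :=
  format02x (PySem.Int.bxor
    (PySem.Int.bxor ((PySem.Int.ofCharsBase? ogCipherText 16).getD 0)
      ((PySem.Int.ofCharsBase? ogPlainText 16).getD 0))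
    ((PySem.Int.ofCharsBase? wantedPlainText 16).getD 0))

def setProperPadding (paddingVal : Int) (nonce : String) (plainTexts : List String) : String :=
  let paddingStrVal := format02x paddingVal
  let n := (PySem.List.pyRange 0 (PySem.Str.len nonce) 2).map
    (fun i => PySem.List.slice nonce.toList (some i) (some (i + 2)))
  let n := (PySem.List.pyRange 0 (paddingVal - 1) 1).foldl
    (fun n i => PySem.List.pySetD n (-(i + 1))
      (setCipherTextFromPlainTextC (PySem.List.pyGetD n (-(i + 1)) [])
        (PySem.List.pyGetD plainTexts i "").toList paddingStrVal)) n
  String.ofList (PySem.Chars.join [] n)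

-- ===== PORT B =====
def setProperPadding_alt (paddingVal : Int) (nonce : String) (plainTexts : List String) : String :=
  let k := paddingVal - 1
  if k ≤ 0 then nonce
  else
    let padHex := format02x paddingVal
    let s := nonce.toList
    let cut0 := 2 * (PySem.Int.floordiv (PySem.Str.len nonce + 1) 2 - k)
    let r := ((PySem.List.slice plainTexts none (some k)).reverse).foldl
      (fun (st : List (List Char) × Int) p =>
        (st.1 ++ [setCipherTextFromPlainTextC
            (PySem.List.slice s (some st.2) (some (st.2 + 2))) p.toList padHex],
         st.2 + 2))
      ([PySem.List.slice s none (some cut0)], cut0)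
    String.ofList (PySem.Chars.join [] r.1)

-- ===== PRECONDITION & SPEC =====
-- Pre_ excludes exactly the inputs where the Python A raises: a padding value whose loop runs off the
-- front of the chunk list (IndexError), too few plainTexts (IndexError), or a consumed chunk/plaintext
-- string that int(·, 16) rejects (ValueError).
def Pre_setProperPadding (paddingVal : Int) (nonce : String) (plainTexts : List String) : Prop :=
  paddingVal ≤ 1 ∨
    ((paddingVal - 1).toNat ≤ (nonce.toList.length + 1) / 2 ∧
     (paddingVal - 1).toNat ≤ plainTexts.length ∧
     ∀ i < (paddingVal - 1).toNat,
       (PySem.Int.ofStrBase? (plainTexts.getD i "") 16).isSome = true ∧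
       (PySem.Int.ofCharsBase?
         ((nonce.toList.drop (2 * ((nonce.toList.length + 1) / 2 - 1 - i))).take 2) 16).isSome = true)

instance (paddingVal : Int) (nonce : String) (plainTexts : List String) : Decidable (Pre_setProperPadding paddingVal nonce plainTexts) := by unfold Pre_setProperPadding; infer_instance

def pvWitness_setProperPadding : Int × String × List String := (3, "aabbcc", ["01", "02"])

def Spec_setProperPadding (paddingVal : Int) (nonce : String) (plainTexts : List String) (out : String) : Prop := out = setProperPadding_alt paddingVal nonce plainTexts
instance (paddingVal : Int) (nonce : String) (plainTexts : List String) (out : String) : Decidable (Spec_setProperPadding paddingVal nonce plainTexts out) := by unfold Spec_setProperPadding; infer_instance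

-- ===== CLAIM (what is proved, stated in full; the proofs are below) =====
def Claim_equal_setProperPadding : Prop := ∀ (paddingVal : Int) (nonce : String) (plainTexts : List String), Dom_setProperPadding paddingVal nonce plainTexts → Pre_setProperPadding paddingVal nonce plainTexts → Spec_setProperPadding paddingVal nonce plainTexts (setProperPadding paddingVal nonce plainTexts)

-- ===== LEMMAS AND PROOFS =====

-- "".join on char-list pieces is flatten
theorem join_nil_eq_flatten (l : List (List Char)) : PySem.Chars.join [] l = l.flatten := by
  induction l with
  | nil => rfl
  | cons a t ih =>
    cases t with
    | nil => simp [PySem.Chars.join, List.intercalate]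
    | cons b r =>
      simp [PySem.Chars.join, List.intercalate, List.intersperse] at ih ⊢
      simpa using ih

-- proof-side view of A's chunk comprehension
def chunksC : List Char → List (List Char)
  | [] => []
  | [a] => [[a]]
  | a :: b :: r => [a, b] :: chunksC r

theorem length_chunksC (s : List Char) : (chunksC s).length = (s.length + 1) / 2 := by
  induction s using chunksC.induct with
  | case1 => rfl
  | case2 a => simp [chunksC]
  | case3 a b r ih => simp [chunksC, ih]; omega

theorem flatten_chunksC (s : List Char) : (chunksC s).flatten = s := by
  induction s using chunksC.induct with
  | case1 => rfl
  | case2 a => rfl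
  | case3 a b r ih => simp [chunksC, ih]

theorem getD_chunksC (s : List Char) (j : Nat) (hj : j < (chunksC s).length) :
    (chunksC s).getD j [] = (s.drop (2 * j)).take 2 := by
  induction s using chunksC.induct generalizing j with
  | case1 => simp [chunksC] at hj
  | case2 a =>
    cases j with
    | zero => simp [chunksC]
    | succ j => simp [chunksC] at hj
  | case3 a b r ih =>
    cases j with
    | zero => simp [chunksC]
    | succ j =>
      simp only [chunksC, List.length_cons] at hj
      have := ih j (by omega)
      simpa [chunksC, Nat.mul_succ, List.drop_drop] using this

theorem flatten_take_chunksC (s : List Char) (m : Nat) :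
    ((chunksC s).take m).flatten = s.take (2 * m) := by
  induction s using chunksC.induct generalizing m with
  | case1 => simp [chunksC]
  | case2 a =>
    cases m with
    | zero => simp
    | succ m => simp [chunksC]; omega
  | case3 a b r ih =>
    cases m with
    | zero => simp
    | succ m =>
      rw [show 2 * (m + 1) = 2 * m + 1 + 1 by omega]
      simp [chunksC, ih, List.take_succ_cons]

theorem range_chunksC (s : List Char) :
    (List.range ((s.length + 1) / 2)).map (fun j => (s.drop (2 * j)).take 2) = chunksC s := by
  induction s using chunksC.induct with
  | case1 => simp [chunksC]
  | case2 a => simp [chunksC, List.range_succ]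
  | case3 a b r ih =>
    have h : ((a :: b :: r).length + 1) / 2 = (r.length + 1) / 2 + 1 := by simp; omega
    rw [h, List.range_succ_eq_map, List.map_cons, List.map_map]
    refine congrArg₂ List.cons (by simp) ?_
    rw [← ih]
    apply List.map_congr_left
    intro j hj
    simp only [Function.comp_apply, Nat.succ_eq_add_one]
    rw [show 2 * (j + 1) = 2 * j + 1 + 1 by omega]
    simp

theorem chunkMap_eq (s : List Char) :
    (PySem.List.pyRange 0 (PySem.Chars.len s) 2).map
      (fun i => PySem.List.slice s (some i) (some (i + 2))) = chunksC s := by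
  rw [PySem.List.pyRange_of_pos 0 _ (by norm_num : (0:Int) < 2)]
  have hc : (if (0:Int) < PySem.Chars.len s then ((PySem.Chars.len s - 0 + 2 - 1) / 2).toNat else 0)
      = (s.length + 1) / 2 := by
    simp only [PySem.Chars.len_eq]
    split <;> omega
  rw [hc, List.map_map, ← range_chunksC s]
  apply List.map_congr_left
  intro j hj
  simp only [Function.comp_apply]
  rw [show (0:Int) + 2 * (j:Int) = ((2 * j : Nat) : Int) by push_cast; ring]
  rw [show ((2 * j : Nat) : Int) + 2 = ((2 * j + 2 : Nat) : Int) by push_cast; ring]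
  rw [PySem.List.slice_natCast]
  congr 1
  omega

-- negative-index forms of pySetD / pyGetD (no PySem lemma covers the pySetD case)
theorem pySetD_neg_natCast' {α : Type} (xs : List α) (k : Nat) (v : α)
    (hk : 0 < k) (hk' : k ≤ xs.length) :
    PySem.List.pySetD xs (-(k : Int)) v = xs.set (xs.length - k) v := by
  have h2 : -(xs.length : Int) ≤ -(k : Int) := by omega
  have h3 : ¬ (k = 0) := by omega
  simp [PySem.List.pySetD, PySem.List.pySet?, PySem.List.pyIdx?, h2, h3]

theorem pyGetD_neg_natCast' {α : Type} (xs : List α) (k : Nat) (d : α)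
    (hk : 0 < k) (hk' : k ≤ xs.length) :
    PySem.List.pyGetD xs (-(k : Int)) d = xs.getD (xs.length - k) d := by
  rw [PySem.List.pyGetD_neg_natCast xs k d hk hk',
    List.getD_eq_getElem xs d (by omega)]

-- invariant of A's mutation loop: after m steps the last m chunks are rewritten
theorem afold (c : List (List Char)) (pts : List String) (pad : List Char) (m : Nat)
    (hm : m ≤ c.length) (hp : m ≤ pts.length) :
    (PySem.List.pyRange 0 (m : Int) 1).foldl
      (fun n i => PySem.List.pySetD n (-(i + 1))
        (setCipherTextFromPlainTextC (PySem.List.pyGetD n (-(i + 1)) [])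
          (PySem.List.pyGetD pts i "").toList pad)) c
    = c.take (c.length - m) ++
        (List.range m).map (fun t => setCipherTextFromPlainTextC (c.getD (c.length - m + t) [])
           (pts.getD (c.length - 1 - (c.length - m + t)) "").toList pad) := by
  induction m with
  | zero => simp [PySem.List.pyRange_one_eq_nil (le_refl (0 : Int))]
  | succ m ih =>
    have hm' : m ≤ c.length := by omega
    have hp' : m ≤ pts.length := by omega
    have hcast : ((m + 1 : Nat) : Int) = (m : Int) + 1 := by push_cast; ring
    rw [hcast, PySem.List.pyRange_one_succ_right (by positivity), List.foldl_append,
      ih hm' hp', List.foldl_cons, List.foldl_nil]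
    set p := c.length - (m + 1) with hpdef
    have hplt : p < c.length := by omega
    set tail := (List.range m).map (fun t => setCipherTextFromPlainTextC (c.getD (c.length - m + t) [])
           (pts.getD (c.length - 1 - (c.length - m + t)) "").toList pad) with htail
    have hlen1 : (c.take (c.length - m)).length = c.length - m := by
      rw [List.length_take]; omega
    have hL : (c.take (c.length - m) ++ tail).length = c.length := by
      rw [List.length_append, hlen1, htail, List.length_map, List.length_range]; omega
    have hneg : -((m : Int) + 1) = -(((m + 1 : Nat)) : Int) := by push_cast; ring
    rw [hneg]
    rw [pyGetD_neg_natCast' _ (m + 1) _ (by omega) (by rw [hL]; omega)]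
    rw [pySetD_neg_natCast' _ (m + 1) _ (by omega) (by rw [hL]; omega)]
    rw [hL]
    have hread : (c.take (c.length - m) ++ tail).getD p [] = c.getD p [] := by
      rw [List.getD_append _ _ _ p (by rw [hlen1]; omega),
        List.getD_eq_getElem _ _ (by rw [hlen1]; omega), List.getElem_take,
        List.getD_eq_getElem c _ (by omega)]
    rw [hread]
    have hsplit : c.take (c.length - m) = c.take p ++ [c.getD p []] := by
      rw [List.getD_eq_getElem c _ hplt, show c.length - m = p + 1 by omega,
        List.take_add_one, List.getElem?_eq_getElem hplt]
      rfl
    rw [hsplit, List.append_assoc, List.set_append,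
      if_neg (by simp [List.length_take]; omega)]
    have hz : p - (c.take p).length = 0 := by simp; omega
    rw [hz]
    simp only [List.singleton_append, List.set_cons_zero]
    rw [List.range_succ_eq_map, List.map_cons, List.map_map]
    refine congrArg₂ (· ++ ·) rfl (congrArg₂ List.cons ?_ ?_)
    · rw [PySem.List.pyGetD_natCast]
      simp only [Nat.add_zero]
      rw [show c.length - 1 - p = m by omega]
    · rw [htail]
      apply List.map_congr_left
      intro t ht
      simp only [Function.comp_apply, Nat.succ_eq_add_one]
      rw [show p + (t + 1) = c.length - m + t by omega]

-- B's accumulator loop, characterised for any plaintext list and start offset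
theorem bfold (s : List Char) (pad : List Char) (L : List String)
    (acc : List (List Char)) (c : Int) :
    L.foldl
      (fun (st : List (List Char) × Int) p =>
        (st.1 ++ [setCipherTextFromPlainTextC
            (PySem.List.slice s (some st.2) (some (st.2 + 2))) p.toList pad],
         st.2 + 2)) (acc, c)
    = (acc ++ (List.range L.length).map (fun (m : Nat) =>
          setCipherTextFromPlainTextC
            (PySem.List.slice s (some (c + 2 * (m : Int))) (some (c + 2 * (m : Int) + 2)))
            (L.getD m "").toList pad),
       c + 2 * L.length) := by
  induction L generalizing acc c with
  | nil => simp
  | cons p L ih =>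
    simp only [List.foldl_cons, ih, List.length_cons, List.range_succ_eq_map, List.map_cons,
      List.map_map]
    rw [Prod.mk.injEq]
    refine ⟨?_, by push_cast; ring⟩
    simp only [List.append_assoc, List.singleton_append]
    refine congrArg _ (congrArg₂ List.cons ?_ ?_)
    · norm_num
    · apply List.map_congr_left
      intro m hm
      simp only [Function.comp_apply, List.getD_cons_succ]
      congr 3 <;> push_cast <;> ring

-- reversed prefix lookup
theorem revTakeGetD (xs : List String) (k m : Nat) (hm : m < k) (hk : k ≤ xs.length) :
    ((xs.take k).reverse).getD m "" = xs.getD (k - 1 - m) "" := by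
  have h1 : m < (xs.take k).reverse.length := by simp [List.length_take]; omega
  rw [List.getD_eq_getElem _ _ h1, List.getElem_reverse,
    List.getElem_take, List.getD_eq_getElem xs _ (by omega)]
  congr 1
  simp [List.length_take]
  omega

-- ===== VERDICT (by name: the statement is the Claim_ definition above) =====
theorem setProperPadding_spec : Claim_equal_setProperPadding := by
  intro pv nonce pts hdom hpre
  unfold Spec_setProperPadding
  simp only [setProperPadding, setProperPadding_alt]
  have hlen : PySem.Str.len nonce = PySem.Chars.len nonce.toList := by
    simp [pysem]
  by_cases hk : pv - 1 ≤ 0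
  · rw [if_pos hk, hlen, chunkMap_eq, PySem.List.pyRange_one_eq_nil hk, List.foldl_nil,
      join_nil_eq_flatten, flatten_chunksC, String.ofList_toList]
  · rw [if_neg hk]
    have hk1 : 1 ≤ pv - 1 := by omega
    set s := nonce.toList with hs
    set kn := (pv - 1).toNat with hknd
    have hpv : pv - 1 = (kn : Int) := by omega
    have hkn1 : 1 ≤ kn := by omega
    rcases hpre with h | ⟨h1, h2, _⟩
    · omega
    have hcn : (chunksC s).length = (s.length + 1) / 2 := length_chunksC s
    have hknc : kn ≤ (chunksC s).length := by rw [hcn]; exact h1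
    rw [hlen, chunkMap_eq, hpv]
    rw [afold (chunksC s) pts _ kn hknc h2]
    -- B side
    rw [PySem.List.slice_to_natCast pts kn]
    have hflo : PySem.Int.floordiv (PySem.Chars.len s + 1) 2 = (((chunksC s).length) : Int) := by
      rw [PySem.Chars.len_eq, PySem.Int.floordiv_eq_ediv_of_pos (by norm_num), hcn]
      omega
    rw [hflo]
    have hcut : (2 : Int) * ((((chunksC s).length) : Int) - (kn : Int))
        = ((2 * ((chunksC s).length - kn) : Nat) : Int) := by omega
    rw [hcut, PySem.List.slice_to_natCast s (2 * ((chunksC s).length - kn))]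
    rw [bfold s (format02x pv) ((pts.take kn).reverse)]
    have hLl : ((pts.take kn).reverse).length = kn := by
      rw [List.length_reverse, List.length_take]; omega
    rw [hLl, join_nil_eq_flatten, join_nil_eq_flatten, List.flatten_append, List.flatten_append]
    refine congrArg String.ofList (congrArg₂ (· ++ ·) ?_ ?_)
    · rw [flatten_take_chunksC]
      simp
    · refine congrArg List.flatten (List.map_congr_left ?_)
      intro m hm
      rw [List.mem_range] at hm
      rw [getD_chunksC s ((chunksC s).length - kn + m) (by omega)]
      rw [revTakeGetD pts kn m hm h2]
      rw [show (((2 * ((chunksC s).length - kn) : Nat)) : Int) + 2 * (m : Int)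
          = ((2 * ((chunksC s).length - kn + m) : Nat) : Int) by omega]
      rw [show (((2 * ((chunksC s).length - kn + m) : Nat)) : Int) + 2
          = ((2 * ((chunksC s).length - kn + m) + 2 : Nat) : Int) by omega]
      rw [PySem.List.slice_natCast]
      rw [show 2 * ((chunksC s).length - kn + m) + 2 - 2 * ((chunksC s).length - kn + m) = 2 by omega]
      rw [show (chunksC s).length - 1 - ((chunksC s).length - kn + m) = kn - 1 - m by omega]
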